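-- pv_equiv track=rewrite | github.com/MPrajwalKini/MiniDB | verification/checksums.py | detect_changes
-- ===== SOURCE A (Python) =====
-- from typing import Dict, Optional
--
-- def detect_changes(stored: Dict[str, str], current: Dict[str, str]) -> Dict[str, str]:
--     """
--     Compare stored vs current checksums.
--     Returns a dict of changed files with their change type:
--       'modified', 'added', 'deleted'
--     """
--     changes: Dict[str, str] = {}
--
--     all_files = set(stored.keys()) | set(current.keys())
--     for filepath in sorted(all_files):
--         in_stored = filepath in stored
--         in_current = filepath in current
--
--         if in_stored and in_current:
--             if stored[filepath] != current[filepath]: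
--                 changes[filepath] = "modified"
--         elif in_current and not in_stored:
--             changes[filepath] = "added"
--         elif in_stored and not in_current:
--             changes[filepath] = "deleted"
--
--     return changes
-- ===== SOURCE B (Python) =====
-- def detect_changes(stored, current):
--     """Two-pointer merge over the two key-sorted item lists: classify while
--     merging, so the output dict is built directly in sorted-filepath order
--     without forming a key union or testing membership."""
--     s = sorted(stored.items(), key=lambda kv: kv[0])
--     c = sorted(current.items(), key=lambda kv: kv[0])
--     changes = {}
--     i = j = 0
--     while i < len(s) and j < len(c):
--         if s[i][0] < c[j][0]:
--             changes[s[i][0]] = "deleted"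
--             i += 1
--         elif c[j][0] < s[i][0]:
--             changes[c[j][0]] = "added"
--             j += 1
--         else:
--             if s[i][1] != c[j][1]:
--                 changes[s[i][0]] = "modified"
--             i += 1
--             j += 1
--     for k, _ in s[i:]:
--         changes[k] = "deleted"
--     for k, _ in c[j:]:
--         changes[k] = "added"
--     return changes
-- ===== Notes on version B (the rewrite author's own statement) =====
-- stated objective: alternative
-- what changed: Replaces A's sorted-union pass with membership tests by a two-pointer merge of the two independently key-sorted item lists that classifies added/deleted/modified while merging, so no key union and no membership or dict lookups are needed.
import Mathlib
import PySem

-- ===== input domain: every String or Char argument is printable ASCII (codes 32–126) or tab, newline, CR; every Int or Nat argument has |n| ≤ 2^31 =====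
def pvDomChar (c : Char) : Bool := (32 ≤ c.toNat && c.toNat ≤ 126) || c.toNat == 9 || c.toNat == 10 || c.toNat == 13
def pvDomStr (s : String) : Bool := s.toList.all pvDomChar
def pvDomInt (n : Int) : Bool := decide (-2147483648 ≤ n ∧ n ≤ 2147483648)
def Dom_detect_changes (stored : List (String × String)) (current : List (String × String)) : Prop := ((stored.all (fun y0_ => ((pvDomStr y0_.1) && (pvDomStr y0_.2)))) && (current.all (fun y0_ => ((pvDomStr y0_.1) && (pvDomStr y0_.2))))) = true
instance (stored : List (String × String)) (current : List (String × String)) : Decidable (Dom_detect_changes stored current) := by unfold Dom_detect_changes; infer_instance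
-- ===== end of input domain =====

-- B replaces A's pass over the sorted key-union (with membership tests and dict lookups)
-- by a two-pointer merge of the two independently key-sorted item lists that classifies
-- added/deleted/modified while merging; an alternative algorithm with equal output.
-- Dicts are association lists per the type convention (lookup = first match).

-- ===== PORT A =====
def detect_changes (stored : List (String × String)) (current : List (String × String)) : List (String × String) :=
  let allFiles : PySem.Set String :=
    PySem.Set.union (PySem.Set.ofList (stored.map Prod.fst)) (PySem.Set.ofList (current.map Prod.fst))
  (List.foldl (fun (changes : PySem.Dict String String) filepath =>
      let inStored := (stored.lookup filepath).isSome
      let inCurrent := (current.lookup filepath).isSome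
      if inStored && inCurrent then
        -- stored[filepath] != current[filepath]: both lookups are `some` under this guard,
        -- so Option inequality is exactly the Python value inequality
        if stored.lookup filepath ≠ current.lookup filepath then changes.insert filepath "modified" else changes
      else if inCurrent && !inStored then changes.insert filepath "added"
      else if inStored && !inCurrent then changes.insert filepath "deleted"
      else changes)
    PySem.Dict.empty
    (PySem.List.sorted allFiles (fun x => x))).items

-- ===== PORT B =====
-- Source B's while loop: a two-pointer merge over the suffixes s[i:], c[j:];
-- returns the dict together with the two unconsumed suffixes (for the tail for-loops)
def pvMergeLoop : List (String × String) → List (String × String) →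
    PySem.Dict String String →
    PySem.Dict String String × List (String × String) × List (String × String)
  | sh :: st, ch :: ct, changes =>
    if sh.1 < ch.1 then pvMergeLoop st (ch :: ct) (changes.insert sh.1 "deleted")
    else if ch.1 < sh.1 then pvMergeLoop (sh :: st) ct (changes.insert ch.1 "added")
    else pvMergeLoop st ct (if sh.2 ≠ ch.2 then changes.insert sh.1 "modified" else changes)
  | s, c, changes => (changes, s, c)
termination_by s c _ => s.length + c.length

def detect_changes_alt (stored : List (String × String)) (current : List (String × String)) : List (String × String) :=
  let s := PySem.List.sorted stored (fun kv => kv.1)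
  let c := PySem.List.sorted current (fun kv => kv.1)
  let r := pvMergeLoop s c PySem.Dict.empty
  let d1 := r.2.1.foldl (fun (d : PySem.Dict String String) kv => d.insert kv.1 "deleted") r.1
  let d2 := r.2.2.foldl (fun (d : PySem.Dict String String) kv => d.insert kv.1 "added") d1
  d2.items

-- ===== PRECONDITION & SPEC =====
-- Pre_ excludes association lists with duplicate filepaths: such lists do not encode a
-- Python dict (whose keys are unique), and A's first-match reading of them is accidental.
def Pre_detect_changes (stored : List (String × String)) (current : List (String × String)) : Prop :=
  (stored.map Prod.fst).Nodup ∧ (current.map Prod.fst).Nodup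
instance (stored : List (String × String)) (current : List (String × String)) : Decidable (Pre_detect_changes stored current) := by unfold Pre_detect_changes; infer_instance
def pvWitness_detect_changes : (List (String × String)) × (List (String × String)) :=
  ([("a", "1"), ("b", "2")], [("a", "1"), ("c", "3")])

def Spec_detect_changes (stored : List (String × String)) (current : List (String × String)) (out : List (String × String)) : Prop := out = detect_changes_alt stored current
instance (stored : List (String × String)) (current : List (String × String)) (out : List (String × String)) : Decidable (Spec_detect_changes stored current out) := by unfold Spec_detect_changes; infer_instance

-- ===== CLAIM (what is proved, stated in full; the proofs are below) =====
def Claim_equal_detect_changes : Prop := ∀ (stored : List (String × String)) (current : List (String × String)), Dom_detect_changes stored current → Pre_detect_changes stored current → Spec_detect_changes stored current (detect_changes stored current)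

-- ===== LEMMAS AND PROOFS =====

-- the classification of one filepath (A's if/elif ladder)
def pvCls (stored current : List (String × String)) (fp : String) : Option String :=
  if (stored.lookup fp).isSome then
    if (current.lookup fp).isSome then
      if stored.lookup fp ≠ current.lookup fp then some "modified" else none
    else some "deleted"
  else if (current.lookup fp).isSome then some "added" else none

def pvG (stored current : List (String × String)) (fp : String) : Option (String × String) :=
  (pvCls stored current fp).map (fun t => (fp, t))

def pvStepA (stored current : List (String × String)) (changes : PySem.Dict String String)
    (filepath : String) : PySem.Dict String String :=
  let inStored := (stored.lookup filepath).isSome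
  let inCurrent := (current.lookup filepath).isSome
  if inStored && inCurrent then
    if stored.lookup filepath ≠ current.lookup filepath then changes.insert filepath "modified" else changes
  else if inCurrent && !inStored then changes.insert filepath "added"
  else if inStored && !inCurrent then changes.insert filepath "deleted"
  else changes

theorem pv_lookup_isSome_iff {ν : Type} (l : List (String × ν)) (a : String) :
    (l.lookup a).isSome = true ↔ a ∈ l.map Prod.fst := by
  induction l with
  | nil => simp
  | cons p t ih =>
    rcases p with ⟨k, v⟩
    by_cases h : a = k
    · simp [List.lookup, h]
    · have hb : (a == k) = false := by simp [h]
      rw [show List.lookup a ((k, v) :: t) = List.lookup a t by rw [List.lookup, hb], ih]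
      simp [h]

theorem pv_stepA_eq (stored current : List (String × String)) (d : PySem.Dict String String)
    (fp : String) :
    pvStepA stored current d fp =
      match pvCls stored current fp with
      | some tag => d.insert fp tag
      | none => d := by
  unfold pvStepA pvCls
  by_cases hs : (stored.lookup fp).isSome <;> by_cases hc : (current.lookup fp).isSome <;>
    by_cases hm : stored.lookup fp ≠ current.lookup fp <;> simp [hs, hc, hm]

theorem pv_foldlA (stored current : List (String × String)) (u : List String)
    (d : PySem.Dict String String) :
    u.foldl (pvStepA stored current) d
      = (u.filterMap (pvG stored current)).foldl (fun d p => d.insert p.1 p.2) d := by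
  induction u generalizing d with
  | nil => rfl
  | cons fp t ih =>
    rw [List.foldl_cons, pv_stepA_eq, List.filterMap_cons]
    cases h : pvCls stored current fp with
    | none =>
      have hg : pvG stored current fp = none := by simp [pvG, h]
      rw [hg]; simp [ih]
    | some tag =>
      have hg : pvG stored current fp = some (fp, tag) := by simp [pvG, h]
      rw [hg]; simp [ih]

theorem pv_mapfst_filterMap (stored current : List (String × String)) (u : List String) :
    (u.filterMap (pvG stored current)).map Prod.fst
      = u.filter (fun fp => (pvCls stored current fp).isSome) := by
  induction u with
  | nil => rfl
  | cons fp t ih =>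
    rw [List.filterMap_cons, List.filter_cons]
    cases h : pvCls stored current fp with
    | none =>
      have hg : pvG stored current fp = none := by simp [pvG, h]
      rw [hg]; simp [ih]
    | some tag =>
      have hg : pvG stored current fp = some (fp, tag) := by simp [pvG, h]
      rw [hg]; simp [ih]

theorem pv_items_insert_nodup (L : List (String × String)) (h : (L.map Prod.fst).Nodup) :
    (List.foldl (fun (d : PySem.Dict String String) p => d.insert p.1 p.2) PySem.Dict.empty L).items = L := by
  have := PySem.Dict.items_foldl_insert_fresh (l := L) (k := Prod.fst) (v := Prod.snd)
    (d := PySem.Dict.empty) (fun a _ => rfl) h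
  simpa using this

-- abbreviations for the proof
def pvU (stored current : List (String × String)) : List String :=
  PySem.List.sorted
    (PySem.Set.union (PySem.Set.ofList (stored.map Prod.fst)) (PySem.Set.ofList (current.map Prod.fst)))
    (fun x => x)

def pvL (stored current : List (String × String)) : List (String × String) :=
  (pvU stored current).filterMap (pvG stored current)

theorem pv_nodup_U (stored current : List (String × String)) : (pvU stored current).Nodup :=
  ((PySem.List.sorted_perm _ _ _).nodup_iff).mpr
    (PySem.Set.nodup_union _ _ (PySem.Set.nodup_ofList _))

theorem pv_pairwise_U (stored current : List (String × String)) :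
    (pvU stored current).Pairwise (fun a b => a < b) := by
  have h1 := PySem.List.sorted_pairwise
    (PySem.Set.union (PySem.Set.ofList (stored.map Prod.fst)) (PySem.Set.ofList (current.map Prod.fst)))
    (fun x => x)
  have h2 := pv_nodup_U stored current
  exact (h1.and h2).imp (fun h => lt_of_le_of_ne h.1 h.2)

theorem pv_nodup_keys_L (stored current : List (String × String)) :
    ((pvL stored current).map Prod.fst).Nodup := by
  rw [pvL, pv_mapfst_filterMap]
  exact (pv_nodup_U stored current).filter _

theorem detect_changes_eq_L (stored current : List (String × String)) :
    detect_changes stored current = pvL stored current := by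
  have h0 : detect_changes stored current
      = (List.foldl (pvStepA stored current) PySem.Dict.empty (pvU stored current)).items := rfl
  rw [h0, pv_foldlA]
  exact pv_items_insert_nodup _ (pv_nodup_keys_L stored current)

theorem pv_pairwise_L (stored current : List (String × String)) :
    (pvL stored current).Pairwise (fun p q => p.1 < q.1) := by
  refine List.Pairwise.filterMap _ (fun a a' hlt b hb b' hb' => ?_) (pv_pairwise_U stored current)
  have h1 : b.1 = a := by
    cases h : pvCls stored current a with
    | none => rw [pvG, h] at hb; cases hb
    | some v => rw [pvG, h] at hb; cases hb; rfl
  have h2 : b'.1 = a' := by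
    cases h : pvCls stored current a' with
    | none => rw [pvG, h] at hb'; cases hb'
    | some v => rw [pvG, h] at hb'; cases hb'; rfl
  rw [h1, h2]; exact hlt

theorem pv_mem_L (stored current : List (String × String)) (fp t : String) :
    (fp, t) ∈ pvL stored current ↔ pvCls stored current fp = some t := by
  constructor
  · intro h
    obtain ⟨a, _, ha⟩ := List.mem_filterMap.mp h
    cases hc : pvCls stored current a <;> rw [pvG, hc] at ha <;> simp_all
  · intro h
    refine List.mem_filterMap.mpr ⟨fp, ?_, by rw [pvG, h]; rfl⟩
    have hmem : fp ∈ stored.map Prod.fst ∨ fp ∈ current.map Prod.fst := by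
      rw [← pv_lookup_isSome_iff, ← pv_lookup_isSome_iff]
      unfold pvCls at h
      by_cases hs : (stored.lookup fp).isSome <;> by_cases hc : (current.lookup fp).isSome <;>
        simp_all
    rw [pvU, PySem.List.mem_sorted, PySem.Set.mem_union]
    simpa [PySem.Set.mem_ofList] using hmem

-- ===== B-side lemmas =====

-- pure-list version of the merge: the sequence of (filepath, tag) pairs B inserts
def pvMergeL : List (String × String) → List (String × String) → List (String × String)
  | [], c => c.map (fun kv => (kv.1, "added"))
  | s, [] => s.map (fun kv => (kv.1, "deleted"))
  | sh :: st, ch :: ct =>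
    if sh.1 < ch.1 then (sh.1, "deleted") :: pvMergeL st (ch :: ct)
    else if ch.1 < sh.1 then (ch.1, "added") :: pvMergeL (sh :: st) ct
    else if sh.2 ≠ ch.2 then (sh.1, "modified") :: pvMergeL st ct
    else pvMergeL st ct
termination_by s c => s.length + c.length

theorem pvMergeL_nil_l (c : List (String × String)) :
    pvMergeL [] c = c.map (fun kv => (kv.1, "added")) := by rw [pvMergeL]

theorem pvMergeL_cons_nil (sh : String × String) (st : List (String × String)) :
    pvMergeL (sh :: st) [] = (sh :: st).map (fun kv => (kv.1, "deleted")) := by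
  rw [pvMergeL]
  simp

theorem pvMergeLoop_nil_l (c : List (String × String)) (d : PySem.Dict String String) :
    pvMergeLoop [] c d = (d, [], c) := by
  rw [pvMergeLoop]
  intro _ _ _ _ h _; cases h

theorem pvMergeLoop_cons_nil (sh : String × String) (st : List (String × String))
    (d : PySem.Dict String String) :
    pvMergeLoop (sh :: st) [] d = (d, sh :: st, []) := by
  rw [pvMergeLoop]
  intro _ _ _ _ _ h; cases h

-- the whole B pipeline (while loop + the two tail for-loops) is one fold over pvMergeL
theorem pv_loop_fold (s c : List (String × String)) (d : PySem.Dict String String) :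
    (pvMergeLoop s c d).2.2.foldl (fun d kv => d.insert kv.1 "added")
      ((pvMergeLoop s c d).2.1.foldl (fun d kv => d.insert kv.1 "deleted") (pvMergeLoop s c d).1)
    = (pvMergeL s c).foldl (fun d p => d.insert p.1 p.2) d := by
  induction s, c, d using pvMergeLoop.induct with
  | case1 sh st ch ct changes h ih =>
    rw [show pvMergeLoop (sh :: st) (ch :: ct) changes
        = pvMergeLoop st (ch :: ct) (changes.insert sh.1 "deleted") by
      rw [pvMergeLoop]; simp [h]]
    rw [show pvMergeL (sh :: st) (ch :: ct) = (sh.1, "deleted") :: pvMergeL st (ch :: ct) by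
      rw [pvMergeL]; simp [h]]
    simpa using ih
  | case2 sh st ch ct changes h1 h2 ih =>
    rw [show pvMergeLoop (sh :: st) (ch :: ct) changes
        = pvMergeLoop (sh :: st) ct (changes.insert ch.1 "added") by
      rw [pvMergeLoop]; simp [h1, h2]]
    rw [show pvMergeL (sh :: st) (ch :: ct) = (ch.1, "added") :: pvMergeL (sh :: st) ct by
      rw [pvMergeL]; simp [h1, h2]]
    simpa using ih
  | case3 sh st ch ct changes h1 h2 ih =>
    rw [show pvMergeLoop (sh :: st) (ch :: ct) changes
        = pvMergeLoop st ct (if sh.2 ≠ ch.2 then changes.insert sh.1 "modified" else changes) by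
      rw [pvMergeLoop]; simp [h1, h2]]
    rw [show pvMergeL (sh :: st) (ch :: ct)
        = (if sh.2 ≠ ch.2 then (sh.1, "modified") :: pvMergeL st ct else pvMergeL st ct) by
      rw [pvMergeL]; simp [h1, h2]]
    by_cases hm : sh.2 ≠ ch.2
    · simp only [dif_pos hm, if_pos hm] at ih ⊢
      simpa using ih
    · simp only [dif_neg hm, if_neg hm] at ih ⊢
      simpa using ih
  | case4 s c changes h =>
    match s, c with
    | [], c => rw [pvMergeLoop_nil_l, pvMergeL_nil_l]; simp [List.foldl_map]
    | sh :: st, [] => rw [pvMergeLoop_cons_nil, pvMergeL_cons_nil]; simp [List.foldl_map]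
    | sh :: st, ch :: ct => exact (h sh st ch ct rfl rfl).elim

-- keys produced by the merge come from one of the two inputs
theorem pv_keys_mergeL (s c : List (String × String)) (fp : String)
    (h : fp ∈ (pvMergeL s c).map Prod.fst) :
    fp ∈ s.map Prod.fst ∨ fp ∈ c.map Prod.fst := by
  induction s, c using pvMergeL.induct with
  | case1 c => rw [pvMergeL_nil_l] at h; right; simpa using h
  | case2 s hne =>
    match s with
    | [] => exact absurd rfl hne
    | sh :: st => rw [pvMergeL_cons_nil] at h; left; simpa using h
  | case3 sh st ch ct h1 ih =>
    rw [show pvMergeL (sh :: st) (ch :: ct) = (sh.1, "deleted") :: pvMergeL st (ch :: ct) by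
      rw [pvMergeL]; simp [h1]] at h
    simp only [List.map_cons, List.mem_cons] at h
    rcases h with h | h
    · left; simp [h]
    · rcases ih h with h | h
      · left; simp [h]
      · right; exact h
  | case4 sh st ch ct h1 h2 ih =>
    rw [show pvMergeL (sh :: st) (ch :: ct) = (ch.1, "added") :: pvMergeL (sh :: st) ct by
      rw [pvMergeL]; simp [h1, h2]] at h
    simp only [List.map_cons, List.mem_cons] at h
    rcases h with h | h
    · right; simp [h]
    · rcases ih h with h | h
      · left; exact h
      · right; simp [h]
  | case5 sh st ch ct h1 h2 h3 ih =>
    rw [show pvMergeL (sh :: st) (ch :: ct) = (sh.1, "modified") :: pvMergeL st ct by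
      rw [pvMergeL]; simp [h1, h2, h3]] at h
    simp only [List.map_cons, List.mem_cons] at h
    rcases h with h | h
    · left; simp [h]
    · rcases ih h with h | h
      · left; simp [h]
      · right; simp [h]
  | case6 sh st ch ct h1 h2 h3 ih =>
    rw [show pvMergeL (sh :: st) (ch :: ct) = pvMergeL st ct by
      rw [pvMergeL]; simp [h1, h2, h3]] at h
    rcases ih h with h | h
    · left; simp [h]
    · right; simp [h]

theorem pv_head_lt (p : String × String) (l : List (String × String))
    (h : (p :: l).Pairwise (fun a b => a.1 < b.1)) :
    ∀ k ∈ l.map Prod.fst, p.1 < k := by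
  intro k hk
  obtain ⟨q, hq, rfl⟩ := List.mem_map.mp hk
  exact (List.pairwise_cons.mp h).1 q hq

theorem pv_pairwise_mergeL (s c : List (String × String))
    (hs : s.Pairwise (fun p q => p.1 < q.1)) (hc : c.Pairwise (fun p q => p.1 < q.1)) :
    (pvMergeL s c).Pairwise (fun p q => p.1 < q.1) := by
  induction s, c using pvMergeL.induct with
  | case1 c =>
    rw [pvMergeL_nil_l]
    exact List.pairwise_map.mpr hc
  | case2 s hne =>
    match s with
    | [] => exact absurd rfl hne
    | sh :: st =>
      rw [pvMergeL_cons_nil]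
      exact List.pairwise_map.mpr hs
  | case3 sh st ch ct h1 ih =>
    rw [show pvMergeL (sh :: st) (ch :: ct) = (sh.1, "deleted") :: pvMergeL st (ch :: ct) by
      rw [pvMergeL]; simp [h1]]
    refine List.pairwise_cons.mpr ⟨fun q hq => ?_, ih (List.pairwise_cons.mp hs).2 hc⟩
    rcases pv_keys_mergeL _ _ q.1 (List.mem_map_of_mem hq) with h | h
    · exact pv_head_lt sh st hs q.1 h
    · rcases (by simpa using h : q.1 = ch.1 ∨ ∃ x, (q.1, x) ∈ ct) with h | ⟨x, hx⟩
      · exact h ▸ h1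
      · exact h1.trans (pv_head_lt ch ct hc q.1 (List.mem_map.mpr ⟨(q.1, x), hx, rfl⟩))
  | case4 sh st ch ct h1 h2 ih =>
    rw [show pvMergeL (sh :: st) (ch :: ct) = (ch.1, "added") :: pvMergeL (sh :: st) ct by
      rw [pvMergeL]; simp [h1, h2]]
    refine List.pairwise_cons.mpr ⟨fun q hq => ?_, ih hs (List.pairwise_cons.mp hc).2⟩
    rcases pv_keys_mergeL _ _ q.1 (List.mem_map_of_mem hq) with h | h
    · rcases (by simpa using h : q.1 = sh.1 ∨ ∃ x, (q.1, x) ∈ st) with h | ⟨x, hx⟩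
      · exact h ▸ h2
      · exact h2.trans (pv_head_lt sh st hs q.1 (List.mem_map.mpr ⟨(q.1, x), hx, rfl⟩))
    · exact pv_head_lt ch ct hc q.1 h
  | case5 sh st ch ct h1 h2 h3 ih =>
    have hk : sh.1 = ch.1 := le_antisymm (not_lt.mp h2) (not_lt.mp h1)
    rw [show pvMergeL (sh :: st) (ch :: ct) = (sh.1, "modified") :: pvMergeL st ct by
      rw [pvMergeL]; simp [h1, h2, h3]]
    refine List.pairwise_cons.mpr
      ⟨fun q hq => ?_, ih (List.pairwise_cons.mp hs).2 (List.pairwise_cons.mp hc).2⟩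
    rcases pv_keys_mergeL _ _ q.1 (List.mem_map_of_mem hq) with h | h
    · exact pv_head_lt sh st hs q.1 h
    · exact hk ▸ pv_head_lt ch ct hc q.1 h
  | case6 sh st ch ct h1 h2 h3 ih =>
    rw [show pvMergeL (sh :: st) (ch :: ct) = pvMergeL st ct by
      rw [pvMergeL]; simp [h1, h2, h3]]
    exact ih (List.pairwise_cons.mp hs).2 (List.pairwise_cons.mp hc).2

theorem pv_lookup_cons_self {ν : Type} (p : String × ν) (l : List (String × ν)) :
    (p :: l).lookup p.1 = some p.2 := by simp [List.lookup]

theorem pv_lookup_cons_ne {ν : Type} (p : String × ν) (l : List (String × ν)) (a : String)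
    (h : a ≠ p.1) : (p :: l).lookup a = l.lookup a := by
  rcases p with ⟨k, v⟩
  have hb : (a == k) = false := by simpa using h
  rw [List.lookup, hb]

theorem pv_lookup_none {ν : Type} (l : List (String × ν)) (a : String)
    (h : a ∉ l.map Prod.fst) : l.lookup a = none := by
  rcases hl : l.lookup a with _ | v
  · rfl
  · exact absurd ((pv_lookup_isSome_iff l a).mp (by simp [hl])) h

theorem pv_not_mem_mergeL (s c : List (String × String)) (fp t : String)
    (hns : fp ∉ s.map Prod.fst) (hnc : fp ∉ c.map Prod.fst) :
    (fp, t) ∉ pvMergeL s c := fun h =>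
  (pv_keys_mergeL s c fp (List.mem_map.mpr ⟨(fp, t), h, rfl⟩)).elim hns hnc

theorem pv_mem_mergeL (s c : List (String × String))
    (hs : s.Pairwise (fun p q => p.1 < q.1)) (hc : c.Pairwise (fun p q => p.1 < q.1))
    (fp t : String) :
    (fp, t) ∈ pvMergeL s c ↔ pvCls s c fp = some t := by
  induction s, c using pvMergeL.induct with
  | case1 c =>
    rw [pvMergeL_nil_l]
    unfold pvCls
    by_cases hcf : (c.lookup fp).isSome
    · obtain ⟨v, hv⟩ := Option.isSome_iff_exists.mp hcf
      have hm := (pv_lookup_isSome_iff c fp).mp hcf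
      simp only [List.lookup_nil, Option.isSome_none, Bool.false_eq_true, if_false, hcf, if_true]
      constructor
      · intro h
        obtain ⟨kv, _, hkv⟩ := List.mem_map.mp h
        cases hkv; rfl
      · intro h
        cases h
        obtain ⟨kv, hkv, hfst⟩ := List.mem_map.mp hm
        exact List.mem_map.mpr ⟨kv, hkv, by rw [hfst]⟩
    · have hm := fun hx => hcf ((pv_lookup_isSome_iff c fp).mpr hx)
      simp only [List.lookup_nil, Option.isSome_none, Bool.false_eq_true, if_false, hcf]
      constructor
      · intro h
        obtain ⟨kv, hkv, hkv2⟩ := List.mem_map.mp h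
        cases hkv2
        exact absurd (List.mem_map_of_mem hkv) hm
      · intro h; cases h
  | case2 s hne =>
    match s with
    | [] => exact absurd rfl hne
    | sh :: st =>
      rw [pvMergeL_cons_nil]
      unfold pvCls
      by_cases hsf : ((sh :: st).lookup fp).isSome
      · have hm := (pv_lookup_isSome_iff (sh :: st) fp).mp hsf
        simp only [List.lookup_nil, Option.isSome_none, Bool.false_eq_true, if_false, hsf, if_true]
        constructor
        · intro h
          obtain ⟨kv, _, hkv⟩ := List.mem_map.mp h
          cases hkv; rfl
        · intro h
          cases h
          obtain ⟨kv, hkv, hfst⟩ := List.mem_map.mp hm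
          exact List.mem_map.mpr ⟨kv, hkv, by rw [hfst]⟩
      · have hm := fun hx => hsf ((pv_lookup_isSome_iff (sh :: st) fp).mpr hx)
        simp only [List.lookup_nil, Option.isSome_none, Bool.false_eq_true, if_false, hsf]
        constructor
        · intro h
          obtain ⟨kv, hkv, hkv2⟩ := List.mem_map.mp h
          cases hkv2
          exact absurd (List.mem_map_of_mem hkv) hm
        · intro h; cases h
  | case3 sh st ch ct h1 ih =>
    rw [show pvMergeL (sh :: st) (ch :: ct) = (sh.1, "deleted") :: pvMergeL st (ch :: ct) by
      rw [pvMergeL]; simp [h1]]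
    by_cases hfp : fp = sh.1
    · subst hfp
      have hnst : sh.1 ∉ st.map Prod.fst := fun h => lt_irrefl _ (pv_head_lt sh st hs sh.1 h)
      have hnc2 : sh.1 ∉ (ch :: ct).map Prod.fst := by
        intro h
        rcases (by simpa using h : sh.1 = ch.1 ∨ ∃ x, (sh.1, x) ∈ ct) with h | ⟨x, hx⟩
        · exact absurd (h ▸ h1) (lt_irrefl _)
        · exact absurd (h1.trans (pv_head_lt ch ct hc sh.1 (List.mem_map.mpr ⟨(sh.1, x), hx, rfl⟩)))
            (lt_irrefl _)
      unfold pvCls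
      rw [pv_lookup_cons_self sh, pv_lookup_none _ _ hnc2]
      simp only [Option.isSome_some, if_true, Option.isSome_none, Bool.false_eq_true, if_false]
      constructor
      · intro h
        rcases List.mem_cons.mp h with h | h
        · cases h; rfl
        · exact absurd h (pv_not_mem_mergeL st (ch :: ct) sh.1 _ hnst hnc2)
      · intro h; cases h; exact List.mem_cons_self ..
    · unfold pvCls
      rw [pv_lookup_cons_ne sh st fp hfp]
      have hmem : (fp, t) ∈ (sh.1, "deleted") :: pvMergeL st (ch :: ct)
          ↔ (fp, t) ∈ pvMergeL st (ch :: ct) := by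
        constructor
        · intro h
          rcases List.mem_cons.mp h with h | h
          · cases h; exact absurd rfl hfp
          · exact h
        · exact List.mem_cons_of_mem _
      rw [hmem]
      exact ih (List.pairwise_cons.mp hs).2 hc
  | case4 sh st ch ct h1 h2 ih =>
    rw [show pvMergeL (sh :: st) (ch :: ct) = (ch.1, "added") :: pvMergeL (sh :: st) ct by
      rw [pvMergeL]; simp [h1, h2]]
    by_cases hfp : fp = ch.1
    · subst hfp
      have hnct : ch.1 ∉ ct.map Prod.fst := fun h => lt_irrefl _ (pv_head_lt ch ct hc ch.1 h)
      have hns2 : ch.1 ∉ (sh :: st).map Prod.fst := by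
        intro h
        rcases (by simpa using h : ch.1 = sh.1 ∨ ∃ x, (ch.1, x) ∈ st) with h | ⟨x, hx⟩
        · exact absurd (h ▸ h2) (lt_irrefl _)
        · exact absurd (h2.trans (pv_head_lt sh st hs ch.1 (List.mem_map.mpr ⟨(ch.1, x), hx, rfl⟩)))
            (lt_irrefl _)
      unfold pvCls
      rw [pv_lookup_none _ _ hns2, pv_lookup_cons_self ch]
      simp only [Option.isSome_some, if_true, Option.isSome_none, Bool.false_eq_true, if_false]
      constructor
      · intro h
        rcases List.mem_cons.mp h with h | h
        · cases h; rfl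
        · exact absurd h (pv_not_mem_mergeL (sh :: st) ct ch.1 _ hns2 hnct)
      · intro h; cases h; exact List.mem_cons_self ..
    · unfold pvCls
      rw [pv_lookup_cons_ne ch ct fp hfp]
      have hmem : (fp, t) ∈ (ch.1, "added") :: pvMergeL (sh :: st) ct
          ↔ (fp, t) ∈ pvMergeL (sh :: st) ct := by
        constructor
        · intro h
          rcases List.mem_cons.mp h with h | h
          · cases h; exact absurd rfl hfp
          · exact h
        · exact List.mem_cons_of_mem _
      rw [hmem]
      exact ih hs (List.pairwise_cons.mp hc).2
  | case5 sh st ch ct h1 h2 h3 ih =>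
    have hk : sh.1 = ch.1 := le_antisymm (not_lt.mp h2) (not_lt.mp h1)
    rw [show pvMergeL (sh :: st) (ch :: ct) = (sh.1, "modified") :: pvMergeL st ct by
      rw [pvMergeL]; simp [h1, h2, h3]]
    by_cases hfp : fp = sh.1
    · subst hfp
      have hnst : sh.1 ∉ st.map Prod.fst := fun h => lt_irrefl _ (pv_head_lt sh st hs sh.1 h)
      have hnct : sh.1 ∉ ct.map Prod.fst := fun h =>
        lt_irrefl _ (lt_of_eq_of_lt hk (pv_head_lt ch ct hc sh.1 (hk ▸ h)) : sh.1 < sh.1)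
      unfold pvCls
      rw [pv_lookup_cons_self sh, show (ch :: ct).lookup sh.1 = some ch.2 by
        rw [hk]; exact pv_lookup_cons_self ch ct]
      simp only [Option.isSome_some, if_true, ne_eq, Option.some.injEq]
      rw [if_pos (by simpa using h3)]
      constructor
      · intro h
        rcases List.mem_cons.mp h with h | h
        · cases h; rfl
        · exact absurd h (pv_not_mem_mergeL st ct sh.1 _ hnst hnct)
      · intro h; cases h; exact List.mem_cons_self ..
    · unfold pvCls
      rw [pv_lookup_cons_ne sh st fp hfp, pv_lookup_cons_ne ch ct fp (by rw [← hk]; exact hfp)]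
      have hmem : (fp, t) ∈ (sh.1, "modified") :: pvMergeL st ct
          ↔ (fp, t) ∈ pvMergeL st ct := by
        constructor
        · intro h
          rcases List.mem_cons.mp h with h | h
          · cases h; exact absurd rfl hfp
          · exact h
        · exact List.mem_cons_of_mem _
      rw [hmem]
      exact ih (List.pairwise_cons.mp hs).2 (List.pairwise_cons.mp hc).2
  | case6 sh st ch ct h1 h2 h3 ih =>
    have hk : sh.1 = ch.1 := le_antisymm (not_lt.mp h2) (not_lt.mp h1)
    have hv : sh.2 = ch.2 := by simpa using h3
    rw [show pvMergeL (sh :: st) (ch :: ct) = pvMergeL st ct by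
      rw [pvMergeL]; simp [h1, h2, h3]]
    by_cases hfp : fp = sh.1
    · subst hfp
      have hnst : sh.1 ∉ st.map Prod.fst := fun h => lt_irrefl _ (pv_head_lt sh st hs sh.1 h)
      have hnct : sh.1 ∉ ct.map Prod.fst := fun h =>
        lt_irrefl _ (lt_of_eq_of_lt hk (pv_head_lt ch ct hc sh.1 (hk ▸ h)) : sh.1 < sh.1)
      unfold pvCls
      rw [pv_lookup_cons_self sh, show (ch :: ct).lookup sh.1 = some ch.2 by
        rw [hk]; exact pv_lookup_cons_self ch ct]
      simp only [Option.isSome_some, if_true, ne_eq, Option.some.injEq]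
      rw [if_neg (by simp [hv])]
      constructor
      · intro h; exact absurd h (pv_not_mem_mergeL st ct sh.1 _ hnst hnct)
      · intro h; cases h
    · unfold pvCls
      rw [pv_lookup_cons_ne sh st fp hfp, pv_lookup_cons_ne ch ct fp (by rw [← hk]; exact hfp)]
      exact ih (List.pairwise_cons.mp hs).2 (List.pairwise_cons.mp hc).2

-- lookup is permutation-invariant on duplicate-free association lists
theorem pv_lookup_some_mem {ν : Type} (l : List (String × ν)) (a : String) (v : ν)
    (h : l.lookup a = some v) : (a, v) ∈ l := by
  induction l with
  | nil => cases h
  | cons p t ih =>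
    rcases p with ⟨k, w⟩
    by_cases hk : a = k
    · rw [show List.lookup a ((k, w) :: t) = some w by simp [List.lookup, hk]] at h
      cases h; simp [hk]
    · have hb : (a == k) = false := by simp [hk]
      rw [show List.lookup a ((k, w) :: t) = List.lookup a t by rw [List.lookup, hb]] at h
      exact List.mem_cons_of_mem _ (ih h)

theorem pv_mem_lookup {ν : Type} (l : List (String × ν)) (a : String) (v : ν)
    (hn : (l.map Prod.fst).Nodup) (h : (a, v) ∈ l) : l.lookup a = some v := by
  induction l with
  | nil => cases h
  | cons p t ih =>
    rcases p with ⟨k, w⟩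
    simp only [List.map_cons, List.nodup_cons] at hn
    rcases List.mem_cons.mp h with h' | h'
    · cases h'; simp [List.lookup]
    · have hk : a ≠ k := by
        intro he; subst he
        exact hn.1 (List.mem_map.mpr ⟨(a, v), h', rfl⟩)
      have hb : (a == k) = false := by simp [hk]
      rw [show List.lookup a ((k, w) :: t) = List.lookup a t by rw [List.lookup, hb]]
      exact ih hn.2 h' 

theorem pv_lookup_perm {ν : Type} (l l' : List (String × ν)) (a : String)
    (hp : l.Perm l') (hn : (l.map Prod.fst).Nodup) : l.lookup a = l'.lookup a := by
  have hn' : (l'.map Prod.fst).Nodup := ((hp.map Prod.fst).nodup_iff).mp hn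
  cases hl : l.lookup a with
  | some v => exact (pv_mem_lookup l' a v hn' (hp.mem_iff.mp (pv_lookup_some_mem l a v hl))).symm
  | none =>
    cases hl' : l'.lookup a with
    | none => rfl
    | some v =>
      have := hp.mem_iff.mpr (pv_lookup_some_mem l' a v hl')
      rw [pv_mem_lookup l a v hn this] at hl; cases hl

-- two strictly key-sorted pair lists with the same members are equal
theorem pv_eq_of_pairwise_mem (l1 l2 : List (String × String))
    (h1 : l1.Pairwise (fun p q => p.1 < q.1)) (h2 : l2.Pairwise (fun p q => p.1 < q.1))
    (hm : ∀ x, x ∈ l1 ↔ x ∈ l2) : l1 = l2 := by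
  have n1 : l1.Nodup := h1.imp (fun h he => absurd (he ▸ h) (lt_irrefl _))
  have n2 : l2.Nodup := h2.imp (fun h he => absurd (he ▸ h) (lt_irrefl _))
  have hp : l1.Perm l2 := (List.perm_ext_iff_of_nodup n1 n2).mpr hm
  exact List.Perm.eq_of_pairwise (fun a b _ _ hab hba => absurd hba (lt_asymm hab)) h1 h2 hp

theorem pv_sorted_pairwise_lt (l : List (String × String)) (hn : (l.map Prod.fst).Nodup) :
    (PySem.List.sorted l (fun kv => kv.1)).Pairwise (fun p q => p.1 < q.1) := by
  have h1 := PySem.List.sorted_pairwise l (fun kv => kv.1)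
  have hn' : ((PySem.List.sorted l (fun kv => kv.1)).map Prod.fst).Nodup :=
    (((PySem.List.sorted_perm l (fun kv => kv.1) false).map Prod.fst).nodup_iff).mpr hn
  have h2 : (PySem.List.sorted l (fun kv => kv.1)).Pairwise (fun p q => p.1 ≠ q.1) :=
    List.pairwise_map.mp hn'
  exact (h1.and h2).imp (fun h => lt_of_le_of_ne h.1 h.2)

theorem detect_changes_alt_eq_L (stored current : List (String × String))
    (hpre : Pre_detect_changes stored current) :
    detect_changes_alt stored current = pvL stored current := by
  obtain ⟨hns, hnc⟩ := hpre
  have hs := pv_sorted_pairwise_lt stored hns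
  have hc := pv_sorted_pairwise_lt current hnc
  have hM := pv_pairwise_mergeL _ _ hs hc
  have h0 : detect_changes_alt stored current
      = ((pvMergeL (PySem.List.sorted stored (fun kv => kv.1))
          (PySem.List.sorted current (fun kv => kv.1))).foldl
          (fun (d : PySem.Dict String String) (p : String × String) => d.insert p.1 p.2)
          PySem.Dict.empty).items :=
    congrArg PySem.Dict.items (pv_loop_fold _ _ _)
  rw [h0, pv_items_insert_nodup _
    (List.pairwise_map.mpr (hM.imp (fun h => (fun he => absurd (he ▸ h) (lt_irrefl _)))))]
  refine pv_eq_of_pairwise_mem _ _ hM (pv_pairwise_L stored current) (fun x => ?_)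
  rcases x with ⟨fp, t⟩
  rw [pv_mem_mergeL _ _ hs hc, pv_mem_L]
  have e1 : (PySem.List.sorted stored (fun kv => kv.1)).lookup fp = stored.lookup fp :=
    (pv_lookup_perm _ _ fp (PySem.List.sorted_perm _ _ _) (((PySem.List.sorted_perm stored (fun kv => kv.1) false).map Prod.fst).nodup_iff.mpr hns))
  have e2 : (PySem.List.sorted current (fun kv => kv.1)).lookup fp = current.lookup fp :=
    (pv_lookup_perm _ _ fp (PySem.List.sorted_perm _ _ _) (((PySem.List.sorted_perm current (fun kv => kv.1) false).map Prod.fst).nodup_iff.mpr hnc))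
  rw [pvCls, pvCls, e1, e2]

-- ===== VERDICT (by name: the statement is the Claim_ definition above) =====
theorem detect_changes_spec : Claim_equal_detect_changes := by
  intro stored current _ hpre
  unfold Spec_detect_changes
  rw [detect_changes_eq_L, detect_changes_alt_eq_L stored current hpre]
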